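-- pv_equiv track=rewrite | github.com/Aasthaengg/IBMdataset | Python_codes/p03761/s574228669.py | myAnswer
-- ===== SOURCE A (Python) =====
-- from collections import Counter
--
-- def myAnswer(N:int,S:list) -> int:
--    dic = []
--    for s in S:
--       dic.append(Counter(s))
--    ans = dic.pop(0)
--    for d in dic:
--       key = set(ans.keys()) - (set(d.keys()) & set(ans.keys()))
--       for k in key:
--          del ans[k]
--       for key,value in d.items():
--          if(key in ans.keys()):
--             ans[key] = min(value,ans[key])
--    result = ""
--    for alph,counter in sorted(ans.items()):
--       result += alph * counter
--    return result
-- ===== SOURCE B (Python) =====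
-- def myAnswer(N: int, S: list) -> int:
--     parts = []
--     for c in sorted(set(S[0])):
--         m = min(s.count(c) for s in S)
--         if m > 0:
--             parts.append(c * m)
--     return "".join(parts)
-- ===== Notes on version B (the rewrite author's own statement) =====
-- stated objective: simpler
-- what changed: Replaces the pairwise Counter-intersection loop (set difference, key deletions, per-item min bookkeeping, final sort of the surviving dict) with a single per-character pass: for each distinct character of S[0] in sorted order, take the minimum count over all strings and emit it if positive.
import Mathlib
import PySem

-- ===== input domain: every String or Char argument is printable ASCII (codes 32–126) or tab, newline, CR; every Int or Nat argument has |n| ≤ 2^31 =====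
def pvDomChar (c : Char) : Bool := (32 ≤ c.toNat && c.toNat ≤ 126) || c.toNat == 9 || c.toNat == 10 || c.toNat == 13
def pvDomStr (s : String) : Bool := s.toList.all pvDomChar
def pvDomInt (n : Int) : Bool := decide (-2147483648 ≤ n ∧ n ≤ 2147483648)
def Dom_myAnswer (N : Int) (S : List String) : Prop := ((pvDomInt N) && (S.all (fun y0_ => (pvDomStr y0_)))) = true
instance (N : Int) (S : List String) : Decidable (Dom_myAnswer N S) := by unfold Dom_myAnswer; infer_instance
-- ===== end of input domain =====

-- B replaces A's pairwise Counter-intersection (set difference, deletions, per-item min updates,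
-- final sort of the surviving dict) by one per-character min-count scan in sorted order (simpler; a timing run measured it faster).

-- ===== PORT A =====
def myAnswer (N : Int) (S : List String) : String :=
  let dic := S.map (fun s => PySem.Dict.counter s.toList)
  match PySem.List.pop? dic 0 with
  | none => ""   -- Python raises IndexError here (S = []); excluded by Pre_myAnswer
  | some (ans0, dic') =>
    let ansF := dic'.foldl (fun ans d =>
      let key := PySem.Set.diff (PySem.Set.ofList ans.keys)
        (PySem.Set.inter (PySem.Set.ofList d.keys) (PySem.Set.ofList ans.keys))
      let ans1 := key.foldl (fun a k => a.erase k) ans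
      d.items.foldl (fun a kv =>
        if a.contains kv.1 then a.insert kv.1 (min kv.2 (a.getD kv.1 0)) else a) ans1) ans0
    -- dict keys are unique, so Python's lexicographic sort of ans.items() is a sort by the key
    String.mk ((PySem.List.sorted ansF.items (fun p => p.1) false).foldl
      (fun r p => r ++ List.replicate p.2.toNat p.1) [])

-- ===== PORT B =====
def myAnswer_alt (N : Int) (S : List String) : String :=
  match S with
  | [] => ""   -- Python B raises IndexError on S[0]; excluded by Pre_myAnswer
  | s0 :: rest =>
    let parts := (PySem.List.sorted (PySem.Set.ofList s0.toList) (fun c => c) false).foldl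
      (fun parts c =>
        -- m = min(s.count(c) for s in S); s.count(c) with a 1-character needle is the character count
        let m : Int := (rest.map (fun s => (s.toList.count c : Int))).foldl min
                         (s0.toList.count c : Int)
        if 0 < m then parts ++ [List.replicate m.toNat c] else parts) []
    String.mk parts.flatten   -- "".join(parts)

-- ===== PRECONDITION & SPEC =====
-- Pre_ excludes only S = [], where both Pythons raise IndexError (A: dic.pop(0), B: S[0]).
def Pre_myAnswer (N : Int) (S : List String) : Prop := S ≠ []
instance (N : Int) (S : List String) : Decidable (Pre_myAnswer N S) := by unfold Pre_myAnswer; infer_instance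
def pvWitness_myAnswer : Int × List String := (2, ["aab", "ba"])
def Spec_myAnswer (N : Int) (S : List String) (out : String) : Prop := out = myAnswer_alt N S
instance (N : Int) (S : List String) (out : String) : Decidable (Spec_myAnswer N S out) := by unfold Spec_myAnswer; infer_instance

-- ===== CLAIM (what is proved, stated in full; the proofs are below) =====
def Claim_equal_myAnswer : Prop := ∀ (N : Int) (S : List String), Dom_myAnswer N S → Pre_myAnswer N S → Spec_myAnswer N S (myAnswer N S)

-- ===== LEMMAS AND PROOFS =====

lemma items_foldl_erase (K : List Char) (d : PySem.Dict Char Int) :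
    (K.foldl (fun a k => a.erase k) d).items
      = d.items.filter (fun p => !K.contains p.1) := by
  induction K generalizing d with
  | nil => simp
  | cons k K ih =>
    rw [List.foldl_cons, ih, PySem.Dict.erase, List.filter_filter]
    apply List.filter_congr
    intro p _
    by_cases h : p.1 = k <;> by_cases h2 : p.1 ∈ K <;> simp [h, h2]

lemma foldl_min_if_not_mem (l : List Char) (c : Char) (v : Char → Int) :
    ∀ x : Int, c ∉ l → l.foldl (fun x k => if k = c then min (v k) x else x) x = x := by
  induction l with
  | nil => intro x _; rfl
  | cons a l ih =>
    intro x hc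
    simp only [List.mem_cons, not_or] at hc
    rw [List.foldl_cons, if_neg (fun h => hc.1 h.symm), ih x hc.2]

lemma foldl_min_if_mem (l : List Char) (c : Char) (v : Char → Int) :
    ∀ x : Int, l.Nodup → c ∈ l →
    l.foldl (fun x k => if k = c then min (v k) x else x) x = min (v c) x := by
  induction l with
  | nil => intro x _ hc; simp at hc
  | cons a l ih =>
    intro x hnd hc
    rcases List.mem_cons.1 hc with h | h
    · subst h
      rw [List.foldl_cons, if_pos rfl,
        foldl_min_if_not_mem l c v _ (List.nodup_cons.1 hnd).1]
    · have hne : a ≠ c := by rintro rfl; exact (List.nodup_cons.1 hnd).1 h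
      rw [List.foldl_cons, if_neg hne, ih x (List.nodup_cons.1 hnd).2 h]

lemma foldl_append_ite {α β : Type} (p : α → Prop) [DecidablePred p] (f : α → β)
    (l : List α) : ∀ acc : List β,
    l.foldl (fun acc x => if p x then acc ++ [f x] else acc) acc
      = acc ++ (l.filter (fun x => decide (p x))).map f := by
  induction l with
  | nil => intro acc; simp
  | cons x l ih =>
    intro acc
    rw [List.foldl_cons]
    by_cases h : p x
    · rw [if_pos h, ih]
      simp [h]
    · rw [if_neg h, ih]
      simp [h]

lemma foldl_min_comm (F : String → Int) (l : List String) :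
    ∀ (a : Int), l.foldl (fun m s => min (F s) m) a = (l.map F).foldl min a := by
  induction l with
  | nil => intro a; rfl
  | cons s l ih =>
    intro a
    rw [List.foldl_cons, List.map_cons, List.foldl_cons, ih, min_comm (F s) a]

lemma foldl_min_pos (l : List Int) : ∀ (a : Int), (0 < l.foldl min a ↔ 0 < a ∧ ∀ x ∈ l, 0 < x) := by
  induction l with
  | nil => intro a; simp
  | cons x l ih =>
    intro a
    simp only [List.foldl_cons, ih, lt_min_iff, List.mem_cons]
    constructor
    · rintro ⟨⟨h1, h2⟩, h3⟩
      exact ⟨h1, fun y hy => by rcases hy with rfl | hy; exact h2; exact h3 y hy⟩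
    · rintro ⟨h1, h2⟩; exact ⟨⟨h1, h2 x (Or.inl rfl)⟩, fun y hy => h2 y (Or.inr hy)⟩

lemma get?_of_items_map (L : List Char) (g : Char → Int) (a : PySem.Dict Char Int)
    (ha : a.items = L.map (fun c => (c, g c))) (k : Char) (hk : k ∈ L) :
    a.get? k = some (g k) := by
  simp only [PySem.Dict.get?, ha]
  clear ha
  induction L with
  | nil => simp at hk
  | cons c L ih =>
    rcases List.mem_cons.1 hk with h | h
    · subst h; simp
    · by_cases hck : c = k
      · subst hck; simp
      · simpa [List.find?_cons, hck] using ih h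

lemma contains_of_items_map (L : List Char) (g : Char → Int) (a : PySem.Dict Char Int)
    (ha : a.items = L.map (fun c => (c, g c))) (k : Char) :
    a.contains k = decide (k ∈ L) := by
  simp only [PySem.Dict.contains, ha, List.any_map]
  show L.any (fun c => c == k) = decide (k ∈ L)
  clear ha a g
  induction L with
  | nil => simp
  | cons c L ih =>
    by_cases h : k = c
    · simp [List.any_cons, h]
    · rw [List.any_cons, ih]
      have h2 : (c == k) = false := by
        simp only [beq_eq_false_iff_ne, ne_eq]
        exact fun hh => h hh.symm
      simp [h2, List.mem_cons, h]

lemma items_update_loop (ps : List (Char × Int)) :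
    ∀ (L : List Char) (g : Char → Int) (a : PySem.Dict Char Int),
    a.items = L.map (fun c => (c, g c)) →
    (ps.foldl (fun a kv =>
        if a.contains kv.1 then a.insert kv.1 (min kv.2 (a.getD kv.1 0)) else a) a).items
      = L.map (fun c => (c, ps.foldl (fun x p => if p.1 = c then min p.2 x else x) (g c))) := by
  induction ps with
  | nil => intro L g a ha; simpa using ha
  | cons kv ps ih =>
    intro L g a ha
    obtain ⟨k, v⟩ := kv
    rw [List.foldl_cons]
    by_cases hk : k ∈ L
    · rw [if_pos (by rw [contains_of_items_map L g a ha]; simpa using hk)]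
      have hget : a.getD k 0 = g k := by
        simp [PySem.Dict.getD, get?_of_items_map L g a ha k hk]
      have hins : (a.insert k (min v (a.getD k 0))).items
          = L.map (fun c => (c, if k = c then min v (g c) else g c)) := by
        rw [PySem.Dict.insert, if_pos (by rw [contains_of_items_map L g a ha]; simpa using hk)]
        simp only [ha, hget, List.map_map]
        apply List.map_congr_left
        intro c _
        by_cases hck : c = k
        · subst hck; simp
        · have hkc : ¬k = c := fun h => hck h.symm
          simp [hck, hkc]
      rw [ih L _ _ hins]
      rfl
    · rw [if_neg (by rw [contains_of_items_map L g a ha]; simpa using hk)]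
      rw [ih L g a ha]
      apply List.map_congr_left
      intro c hc
      have : k ≠ c := fun h => hk (h ▸ hc)
      simp [List.foldl_cons, this]

lemma loop_items (rest : List String) :
    ∀ (L : List Char) (g : Char → Int) (ans : PySem.Dict Char Int),
    ans.items = L.map (fun c => (c, g c)) →
    ((rest.map (fun s => PySem.Dict.counter s.toList)).foldl (fun ans d =>
      let key := PySem.Set.diff (PySem.Set.ofList ans.keys)
        (PySem.Set.inter (PySem.Set.ofList d.keys) (PySem.Set.ofList ans.keys))
      let ans1 := key.foldl (fun a k => a.erase k) ans
      d.items.foldl (fun a kv =>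
        if a.contains kv.1 then a.insert kv.1 (min kv.2 (a.getD kv.1 0)) else a) ans1) ans).items
      = (L.filter (fun c => rest.all (fun s => s.toList.contains c))).map
          (fun c => (c, rest.foldl (fun m s => min ((s.toList.count c : Int)) m) (g c))) := by
  induction rest with
  | nil => intro L g ans ha; simpa using ha
  | cons s rest ih =>
    intro L g ans ha
    rw [List.map_cons, List.foldl_cons]
    -- keys of ans
    have hkeys : ans.keys = L := by
      simp [PySem.Dict.keys, ha, Function.comp_def]
    -- the erased dict
    have herase :
        ((PySem.Set.diff (PySem.Set.ofList ans.keys)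
          (PySem.Set.inter (PySem.Set.ofList (PySem.Dict.counter s.toList).keys)
            (PySem.Set.ofList ans.keys))).foldl (fun a k => a.erase k) ans).items
        = (L.filter (fun c => s.toList.contains c)).map (fun c => (c, g c)) := by
      rw [items_foldl_erase, ha, List.filter_map]
      congr 1
      apply List.filter_congr
      intro c hc
      simp only [Function.comp]
      have hK : List.contains (PySem.Set.diff (PySem.Set.ofList ans.keys)
          (PySem.Set.inter (PySem.Set.ofList (PySem.Dict.counter s.toList).keys)
            (PySem.Set.ofList ans.keys))) c
          = decide (c ∉ s.toList) := by
        by_cases hcs : c ∈ s.toList <;>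
          simp [PySem.Set.mem_diff, PySem.Set.mem_inter,
            PySem.Set.mem_ofList, PySem.Dict.keys_counter, hkeys, hc, hcs]
      rw [hK]
      by_cases hcs : c ∈ s.toList <;> simp [hcs]
    have hupd : (L.filter (fun c => s.toList.contains c)).map
        (fun c => (c, ((PySem.Set.ofList s.toList).map
            (fun k => (k, (s.toList.count k : Int)))).foldl
            (fun x p => if p.1 = c then min p.2 x else x) (g c)))
        = (L.filter (fun c => s.toList.contains c)).map
            (fun c => (c, min ((s.toList.count c : Int)) (g c))) := by
      apply List.map_congr_left
      intro c hc
      have hcs : c ∈ s.toList := by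
        have := List.of_mem_filter hc
        simpa using this
      rw [List.foldl_map]
      rw [foldl_min_if_mem _ c _ _ (PySem.Set.nodup_ofList _)
        ((PySem.Set.mem_ofList _ _).2 hcs)]
    have hstep := items_update_loop ((PySem.Dict.counter s.toList).items)
        (L.filter (fun c => s.toList.contains c)) g _ herase
    have hstep2 : ((PySem.Dict.counter s.toList).items.foldl
        (fun a kv => if a.contains kv.1 then a.insert kv.1 (min kv.2 (a.getD kv.1 0)) else a)
        ((PySem.Set.diff (PySem.Set.ofList ans.keys)
          (PySem.Set.inter (PySem.Set.ofList (PySem.Dict.counter s.toList).keys)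
            (PySem.Set.ofList ans.keys))).foldl (fun a k => a.erase k) ans)).items
        = (L.filter (fun c => s.toList.contains c)).map
            (fun c => (c, min ((s.toList.count c : Int)) (g c))) := by
      rw [hstep, PySem.Dict.items_counter]
      exact hupd
    have hmain := ih (L.filter (fun c => s.toList.contains c))
        (fun c => min ((s.toList.count c : Int)) (g c)) _ hstep2
    refine hmain.trans ?_
    rw [List.filter_filter]
    simp only [List.all_cons, List.foldl_cons]
    congr 1
    apply List.filter_congr
    intro c _
    exact Bool.and_comm _ _


-- ===== VERDICT (by name: the statement is the Claim_ definition above) =====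
theorem myAnswer_spec : Claim_equal_myAnswer := by
  intro N S _ hpre
  unfold Spec_myAnswer
  cases S with
  | nil => exact absurd rfl hpre
  | cons s0 rest =>
    simp only [myAnswer, myAnswer_alt, List.map_cons, PySem.List.pop?_zero_cons]
    rw [loop_items rest (PySem.Set.ofList s0.toList)
      (fun c => ((List.count c s0.toList : Nat) : Int)) _ (PySem.Dict.items_counter s0.toList)]
    rw [PySem.List.sorted_eq_of_perm_of_pairwise_lt _
      ((((PySem.List.sorted (PySem.Set.ofList s0.toList) (fun c => c) false).filter
          (fun c => rest.all (fun s => s.toList.contains c))).map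
        (fun c => (c, rest.foldl (fun m s => min ((List.count c s.toList : Nat) : Int) m)
          ((List.count c s0.toList : Nat) : Int)))))
      (fun p => p.1)
      (((PySem.List.sorted_perm (PySem.Set.ofList s0.toList) (fun c => c) false).filter _).map _)
      (List.pairwise_map.2 ((List.Pairwise.sublist List.filter_sublist
        (PySem.List.sorted_ofList_pairwise_lt s0.toList))))]
    rw [PySem.List.foldl_append_eq_flatMap]
    rw [foldl_append_ite (fun c => 0 < (rest.map (fun s => ((List.count c s.toList : Nat) : Int))).foldl
          min ((List.count c s0.toList : Nat) : Int))
        (fun c => List.replicate ((rest.map (fun s => ((List.count c s.toList : Nat) : Int))).foldl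
          min ((List.count c s0.toList : Nat) : Int)).toNat c)]
    rw [List.nil_append, List.nil_append, List.flatMap_map]
    have hfilt : (PySem.List.sorted (PySem.Set.ofList s0.toList) (fun c => c) false).filter
          (fun c => decide (0 < (rest.map (fun s => ((List.count c s.toList : Nat) : Int))).foldl
            min ((List.count c s0.toList : Nat) : Int)))
        = (PySem.List.sorted (PySem.Set.ofList s0.toList) (fun c => c) false).filter
            (fun c => rest.all (fun s => s.toList.contains c)) := by
      apply List.filter_congr
      intro c hc
      have hc0 : c ∈ s0.toList := by
        have := (PySem.List.mem_sorted _ _ _ c).1 hc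
        exact (PySem.Set.mem_ofList _ _).1 this
      have hiff : (0 < (rest.map (fun s => ((List.count c s.toList : Nat) : Int))).foldl
            min ((List.count c s0.toList : Nat) : Int)) ↔ ∀ s ∈ rest, c ∈ s.toList := by
        rw [foldl_min_pos]
        constructor
        · rintro ⟨-, h2⟩ s hs
          have := h2 _ (List.mem_map_of_mem hs)
          rwa [Int.natCast_pos, List.count_pos_iff] at this
        · intro h
          refine ⟨by rwa [Int.natCast_pos, List.count_pos_iff], ?_⟩
          rintro x hx
          obtain ⟨s, hs, rfl⟩ := List.mem_map.1 hx
          rw [Int.natCast_pos, List.count_pos_iff]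
          exact h s hs
      by_cases h : ∀ s ∈ rest, c ∈ s.toList
      · rw [decide_eq_true (hiff.mpr h), eq_comm, List.all_eq_true]
        intro s hs
        simpa using h s hs
      · push Not at h
        obtain ⟨s, hs, hcs⟩ := h
        have : ¬ (0 < (rest.map (fun s => ((List.count c s.toList : Nat) : Int))).foldl
            min ((List.count c s0.toList : Nat) : Int)) := by
          rw [hiff]
          push Not
          exact ⟨s, hs, hcs⟩
        have hall : rest.all (fun s => s.toList.contains c) = false := by
          rw [List.all_eq_false]
          exact ⟨s, hs, by simpa using hcs⟩
        rw [hall, decide_eq_false this]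
    rw [hfilt]
    have hfun : (fun c : Char => List.replicate
          ((rest.map (fun s => ((List.count c s.toList : Nat) : Int))).foldl min
            ((List.count c s0.toList : Nat) : Int)).toNat c)
        = fun c : Char => List.replicate
            (rest.foldl (fun m s => min ((List.count c s.toList : Nat) : Int) m)
              ((List.count c s0.toList : Nat) : Int)).toNat c := by
      funext c
      rw [foldl_min_comm]
    rw [hfun, ← List.flatMap_def]
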